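-- pv_equiv track=rewrite | github.com/montimaj/Python_Practice | Orthopetra/orthopetra.py | dict_type_count
-- ===== SOURCE A (Python) =====
-- def min_max_kv(dictionary):
--     min=list(dictionary.values())[0]
--     max=min
--     for key, value in dictionary.items():
--         if value < min:
--             min = value
--         if value > max:
--             max = value
--     min_kv=[]
--     max_kv=[]
--     for key, value in dictionary.items():
--         if value==min:
--             min_kv.append((key, value))
--         if value==max:
--             max_kv.append((key, value))
--     return min_kv, max_kv
--
-- def dict_type_count(dictionary, type):
--     count_dict={}
--     for key, data_list in dictionary.items():
--         data_set=set()
--         for data_tuple in data_list: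
--             if data_tuple[type]:
--                 data_set.add(data_tuple[:type+1])
--         count_dict[key]=len(data_set)
--     return min_max_kv(count_dict)
-- ===== SOURCE B (Python) =====
-- def dict_type_count(dictionary, type):
--     counts = {key: len({t[:type + 1] for t in lst if t[type]})
--               for key, lst in dictionary.items()}
--     groups = {}
--     for key, c in counts.items():
--         groups.setdefault(c, []).append((key, c))
--     return groups[min(groups)], groups[max(groups)]
-- ===== Notes on version B (the rewrite author's own statement) =====
-- stated objective: alternative
-- what changed: The two-scan min_max_kv (running min/max pass, then a collecting pass) is replaced by a single pass that groups the count entries into a dict keyed by count, after which the answer is a direct lookup of the min and max group keys; the per-key distinct-prefix count becomes a set comprehension.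
import Mathlib
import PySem

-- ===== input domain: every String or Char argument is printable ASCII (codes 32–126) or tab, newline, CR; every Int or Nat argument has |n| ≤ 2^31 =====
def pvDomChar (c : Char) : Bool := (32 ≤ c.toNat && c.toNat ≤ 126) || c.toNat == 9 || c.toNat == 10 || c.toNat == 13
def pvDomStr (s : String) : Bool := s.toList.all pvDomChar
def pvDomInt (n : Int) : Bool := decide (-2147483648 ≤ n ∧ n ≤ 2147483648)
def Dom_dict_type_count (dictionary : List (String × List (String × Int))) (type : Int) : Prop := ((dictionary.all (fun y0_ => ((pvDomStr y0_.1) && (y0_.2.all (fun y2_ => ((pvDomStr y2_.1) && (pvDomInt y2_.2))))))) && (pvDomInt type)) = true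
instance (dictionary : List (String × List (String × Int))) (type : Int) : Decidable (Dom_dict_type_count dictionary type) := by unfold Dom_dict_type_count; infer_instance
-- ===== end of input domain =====

-- B replaces A's two-scan min/max selection by a single grouping pass over the counts
-- plus a lookup of the min/max group key (alternative decomposition, same cost).


-- ===== PORT A =====
-- a Python 2-tuple (s, n) encoded as a heterogeneous list, so that data_tuple[type]
-- (any index) and the slice data_tuple[:type+1] are the PySem primitives
def pvEnc (t : String × Int) : List (Sum String Int) := [Sum.inl t.1, Sum.inr t.2]

-- Python truthiness of data_tuple[type]; 'none' is Python's IndexError (excluded by Pre_),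
-- the port treats it as falsy there (totality guard only)
def pvTruthy : Option (Sum String Int) → Bool
  | some (Sum.inl s) => !(s == "")
  | some (Sum.inr n) => !(n == 0)
  | none => false

def min_max_kv (d : PySem.Dict String Int) : (List (String × Int)) × (List (String × Int)) :=
  match PySem.List.pyGet? d.values 0 with
  | none => ([], [])   -- Python: list(dictionary.values())[0] raises IndexError (excluded by Pre_)
  | some v0 =>
    let mm := d.items.foldl (fun (p : Int × Int) kv =>
        (if kv.2 < p.1 then kv.2 else p.1, if kv.2 > p.2 then kv.2 else p.2)) (v0, v0)
    d.items.foldl (fun (acc : List (String × Int) × List (String × Int)) kv =>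
        (if kv.2 == mm.1 then acc.1 ++ [kv] else acc.1,
         if kv.2 == mm.2 then acc.2 ++ [kv] else acc.2)) ([], [])

def dict_type_count (dictionary : List (String × List (String × Int))) (type : Int) : (List (String × Int)) × (List (String × Int)) :=
  let count_dict : PySem.Dict String Int := dictionary.foldl (fun cd p =>
      let data_set : PySem.Set (List (Sum String Int)) := p.2.foldl (fun s t =>
          if pvTruthy (PySem.List.pyGet? (pvEnc t) type)
          then PySem.Set.add s (PySem.List.slice (pvEnc t) none (some (type + 1)))
          else s) PySem.Set.empty
      cd.insert p.1 (data_set.length : Int)) PySem.Dict.empty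
  min_max_kv count_dict

-- ===== PORT B =====
def dict_type_count_alt (dictionary : List (String × List (String × Int))) (type : Int) : (List (String × Int)) × (List (String × Int)) :=
  let counts : PySem.Dict String Int := dictionary.foldl (fun d p =>
      d.insert p.1 ((PySem.Set.ofList ((p.2.filter (fun t =>
          pvTruthy (PySem.List.pyGet? (pvEnc t) type))).map (fun t =>
          PySem.List.slice (pvEnc t) none (some (type + 1))))).length : Int)) PySem.Dict.empty
  let groups : PySem.Dict Int (List (String × Int)) :=
    counts.items.foldl (fun g p => g.modify p.2 [] (fun l => l ++ [p])) PySem.Dict.empty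
  match PySem.List.min? groups.keys (fun x => x), PySem.List.max? groups.keys (fun x => x) with
  | some lo, some hi => (groups.getD lo [], groups.getD hi [])
  | _, _ => ([], [])   -- Python: min()/max() of the empty dict raises ValueError (excluded by Pre_)

-- ===== PRECONDITION & SPEC =====
-- Pre_ is exactly where the Python A returns: on [] A's list(...)[0] raises IndexError, and
-- for an index outside -2..1 A's data_tuple[type] raises IndexError as soon as some list is nonempty.
def Pre_dict_type_count (dictionary : List (String × List (String × Int))) (type : Int) : Prop :=
  dictionary ≠ [] ∧ (type = -2 ∨ type = -1 ∨ type = 0 ∨ type = 1 ∨ ∀ p ∈ dictionary, p.2 = [])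
instance (dictionary : List (String × List (String × Int))) (type : Int) : Decidable (Pre_dict_type_count dictionary type) := by unfold Pre_dict_type_count; infer_instance

def pvWitness_dict_type_count : (List (String × List (String × Int))) × Int :=
  ([("ab", [("x", 1), ("x", 2), ("", 0)]), ("c", [("y", 3)])], 0)

def Spec_dict_type_count (dictionary : List (String × List (String × Int))) (type : Int) (out : (List (String × Int)) × (List (String × Int))) : Prop := out = dict_type_count_alt dictionary type
instance (dictionary : List (String × List (String × Int))) (type : Int) (out : (List (String × Int)) × (List (String × Int))) : Decidable (Spec_dict_type_count dictionary type out) := by unfold Spec_dict_type_count; infer_instance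

-- ===== CLAIM (what is proved, stated in full; the proofs are below) =====
def Claim_equal_dict_type_count : Prop := ∀ (dictionary : List (String × List (String × Int))) (type : Int), Dom_dict_type_count dictionary type → Pre_dict_type_count dictionary type → Spec_dict_type_count dictionary type (dict_type_count dictionary type)

-- ===== LEMMAS AND PROOFS =====

-- the two per-key counting loops build the same set
lemma pv_set_eq (type : Int) (lst : List (String × Int)) :
    lst.foldl (fun s t =>
        if pvTruthy (PySem.List.pyGet? (pvEnc t) type)
        then PySem.Set.add s (PySem.List.slice (pvEnc t) none (some (type + 1)))
        else s) PySem.Set.empty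
    = PySem.Set.ofList ((lst.filter (fun t =>
        pvTruthy (PySem.List.pyGet? (pvEnc t) type))).map (fun t =>
        PySem.List.slice (pvEnc t) none (some (type + 1)))) := by
  rw [PySem.List.foldl_if_eq_foldl_filter, ← PySem.Set.update_map_eq_foldl_add,
    PySem.Set.update_empty]

-- both first passes build the same count dictionary
lemma pv_counts_eq (dictionary : List (String × List (String × Int))) (type : Int) :
    (dictionary.foldl (fun cd p =>
        let data_set : PySem.Set (List (Sum String Int)) := p.2.foldl (fun s t =>
            if pvTruthy (PySem.List.pyGet? (pvEnc t) type)
            then PySem.Set.add s (PySem.List.slice (pvEnc t) none (some (type + 1)))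
            else s) PySem.Set.empty
        cd.insert p.1 (data_set.length : Int)) PySem.Dict.empty)
    = dictionary.foldl (fun d p =>
        d.insert p.1 ((PySem.Set.ofList ((p.2.filter (fun t =>
            pvTruthy (PySem.List.pyGet? (pvEnc t) type))).map (fun t =>
            PySem.List.slice (pvEnc t) none (some (type + 1))))).length : Int)) PySem.Dict.empty := by
  exact PySem.List.foldl_congr_mem _ _ _ _ (fun acc p _ => by simp only [pv_set_eq])

-- min over the distinct values equals min over the values (identity key), and same for max
lemma pv_min_ofList (xs : List Int) :
    PySem.List.min? (PySem.Set.ofList xs) (fun x => x) = PySem.List.min? xs (fun x => x) := by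
  cases hx : xs with
  | nil => simp [PySem.Set.ofList_nil]
  | cons a t =>
    have hne : (PySem.Set.ofList (a :: t)) ≠ [] := by
      intro h
      have : a ∈ PySem.Set.ofList (a :: t) := by
        rw [PySem.Set.mem_ofList]; exact List.mem_cons_self
      simp [h] at this
    obtain ⟨m1, hm1⟩ : ∃ m, PySem.List.min? (PySem.Set.ofList (a :: t)) (fun x => x) = some m := by
      cases h : PySem.List.min? (PySem.Set.ofList (a :: t)) (fun x => x) with
      | none => exact absurd ((PySem.List.min?_eq_none_iff _ _).mp h) hne
      | some m => exact ⟨m, rfl⟩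
    obtain ⟨m2, hm2⟩ : ∃ m, PySem.List.min? (a :: t) (fun x => x) = some m := by
      cases h : PySem.List.min? (a :: t) (fun x => x) with
      | none => simp at h
      | some m => exact ⟨m, rfl⟩
    rw [hm1, hm2]
    have h1m := PySem.List.min?_mem hm1
    have h2m := PySem.List.min?_mem hm2
    have h1 := PySem.List.min?_isMin hm1
    have h2 := PySem.List.min?_isMin hm2
    rw [PySem.Set.mem_ofList] at h1m
    have ha := h2 m1 h1m
    have hb := h1 m2 ((PySem.Set.mem_ofList _ _).mpr h2m)
    have : m1 = m2 := by omega
    rw [this]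

lemma pv_max_ofList (xs : List Int) :
    PySem.List.max? (PySem.Set.ofList xs) (fun x => x) = PySem.List.max? xs (fun x => x) := by
  cases hx : xs with
  | nil => simp [PySem.Set.ofList_nil]
  | cons a t =>
    have hne : (PySem.Set.ofList (a :: t)) ≠ [] := by
      intro h
      have : a ∈ PySem.Set.ofList (a :: t) := by
        rw [PySem.Set.mem_ofList]; exact List.mem_cons_self
      simp [h] at this
    obtain ⟨m1, hm1⟩ : ∃ m, PySem.List.max? (PySem.Set.ofList (a :: t)) (fun x => x) = some m := by
      cases h : PySem.List.max? (PySem.Set.ofList (a :: t)) (fun x => x) with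
      | none => exact absurd ((PySem.List.max?_eq_none_iff _ _).mp h) hne
      | some m => exact ⟨m, rfl⟩
    obtain ⟨m2, hm2⟩ : ∃ m, PySem.List.max? (a :: t) (fun x => x) = some m := by
      cases h : PySem.List.max? (a :: t) (fun x => x) with
      | none => simp at h
      | some m => exact ⟨m, rfl⟩
    rw [hm1, hm2]
    have h1m := PySem.List.max?_mem hm1
    have h2m := PySem.List.max?_mem hm2
    have h1 := PySem.List.max?_isMax hm1
    have h2 := PySem.List.max?_isMax hm2
    rw [PySem.Set.mem_ofList] at h1m
    have ha := h2 m1 h1m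
    have hb := h1 m2 ((PySem.Set.mem_ofList _ _).mpr h2m)
    have : m1 = m2 := by omega
    rw [this]

-- A's running-min loop over the items computes min(values), likewise for max
lemma pv_foldl_min (l : List (String × Int)) (v0 : Int) :
    l.foldl (fun m (kv : String × Int) => if kv.2 < m then kv.2 else m) v0
    = (l.map (fun p => p.2)).foldl min v0 := by
  induction l generalizing v0 with
  | nil => rfl
  | cons a t ih =>
    simp only [List.map_cons, List.foldl_cons, ih]
    congr 1
    by_cases h : a.2 < v0 <;> rw [min_def] <;> split_ifs <;> omega

lemma pv_foldl_max (l : List (String × Int)) (v0 : Int) :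
    l.foldl (fun m (kv : String × Int) => if kv.2 > m then kv.2 else m) v0
    = (l.map (fun p => p.2)).foldl max v0 := by
  induction l generalizing v0 with
  | nil => rfl
  | cons a t ih =>
    simp only [List.map_cons, List.foldl_cons, ih]
    congr 1
    by_cases h : v0 < a.2 <;> rw [max_def] <;> split_ifs <;> omega

-- B's grouping pass: the group of a count c is the filter of the items at c
lemma pv_groups_getD (l : List (String × Int)) (c : Int) :
    (l.foldl (fun (g : PySem.Dict Int (List (String × Int))) p =>
        g.modify p.2 [] (fun acc => acc ++ [p])) PySem.Dict.empty).getD c []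
    = l.filter (fun p => p.2 == c) := by
  have h := PySem.Dict.getD_foldl_modify_append
    (l := l.map (fun p => (p.2, p))) (d := PySem.Dict.empty) (c := c)
  rw [List.foldl_map] at h
  simpa [List.filter_map, Function.comp_def, PySem.Dict.getD_empty] using h

-- the keys of B's groups dict are the distinct count values
lemma pv_groups_keys (l : List (String × Int)) :
    (l.foldl (fun (g : PySem.Dict Int (List (String × Int))) p =>
        g.modify p.2 [] (fun acc => acc ++ [p])) PySem.Dict.empty).keys
    = PySem.Set.ofList (l.map (fun p => p.2)) := by
  have h := PySem.Dict.keys_foldl_modify_key (l := l) (key := fun p : String × Int => p.2)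
    (d0 := []) (f := fun _ p => (fun acc => acc ++ [p])) (d := PySem.Dict.empty)
  rw [PySem.Dict.keys_empty, PySem.Set.update_nil_left] at h
  exact h

-- core: A's min_max_kv agrees with B's grouping stage on any nonempty dict
lemma pv_core (cd : PySem.Dict String Int) (hne : cd.items ≠ []) :
    min_max_kv cd
    = (let groups : PySem.Dict Int (List (String × Int)) :=
        cd.items.foldl (fun g p => g.modify p.2 [] (fun l => l ++ [p])) PySem.Dict.empty
      match PySem.List.min? groups.keys (fun x => x), PySem.List.max? groups.keys (fun x => x) with
      | some lo, some hi => (groups.getD lo [], groups.getD hi [])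
      | _, _ => ([], [])) := by
  simp only [min_max_kv]
  obtain ⟨p0, t, hl⟩ : ∃ p0 t, cd.items = p0 :: t := by
    cases h : cd.items with
    | nil => exact absurd h hne
    | cons a b => exact ⟨a, b, rfl⟩
  have hvals : cd.values = p0.2 :: t.map (fun p => p.2) := by
    simp [PySem.Dict.values, hl]
  rw [hvals, PySem.List.pyGet?_zero_cons]
  simp only [pv_groups_keys, pv_min_ofList, pv_max_ofList, pv_groups_getD]
  rw [PySem.List.foldl_prod_mk
      (f := fun m (kv : String × Int) => if kv.2 < m then kv.2 else m)
      (g := fun m (kv : String × Int) => if kv.2 > m then kv.2 else m),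
    pv_foldl_min, pv_foldl_max]
  have hmap : cd.items.map (fun p => p.2) = p0.2 :: t.map (fun p => p.2) := by rw [hl]; rfl
  rw [hmap, PySem.List.min?_id_cons, PySem.List.max?_id_cons]
  simp only [List.foldl_cons, min_self, max_self]
  rw [PySem.List.foldl_prod_mk
      (f := fun acc (kv : String × Int) =>
        if kv.2 == (t.map (fun p => p.2)).foldl min p0.2 then acc ++ [kv] else acc)
      (g := fun acc (kv : String × Int) =>
        if kv.2 == (t.map (fun p => p.2)).foldl max p0.2 then acc ++ [kv] else acc)]
  rw [PySem.List.foldl_append_if_eq_filter, PySem.List.foldl_append_if_eq_filter]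
  simp

-- the count dictionary of a nonempty input dictionary is nonempty
lemma pv_counts_ne (dictionary : List (String × List (String × Int))) (type : Int)
    (h : dictionary ≠ []) :
    (dictionary.foldl (fun d p =>
        d.insert p.1 ((PySem.Set.ofList ((p.2.filter (fun t =>
            pvTruthy (PySem.List.pyGet? (pvEnc t) type))).map (fun t =>
            PySem.List.slice (pvEnc t) none (some (type + 1))))).length : Int)) PySem.Dict.empty).items ≠ [] := by
  intro hnil
  obtain ⟨p0, t, hl⟩ : ∃ p0 t, dictionary = p0 :: t := by
    cases dictionary with
    | nil => exact absurd rfl h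
    | cons a b => exact ⟨a, b, rfl⟩
  have hk := PySem.Dict.keys_foldl_insert_key (l := dictionary)
    (key := fun p : String × List (String × Int) => p.1)
    (f := fun _ p => ((PySem.Set.ofList ((p.2.filter (fun t =>
            pvTruthy (PySem.List.pyGet? (pvEnc t) type))).map (fun t =>
            PySem.List.slice (pvEnc t) none (some (type + 1))))).length : Int))
    (d := PySem.Dict.empty)
  rw [PySem.Dict.keys_empty, PySem.Set.update_nil_left] at hk
  have : p0.1 ∈ PySem.Set.ofList (dictionary.map (fun p => p.1)) := by
    rw [PySem.Set.mem_ofList, hl]; exact List.mem_cons_self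
  rw [← hk] at this
  simp [PySem.Dict.keys, hnil] at this

-- ===== VERDICT (by name: the statement is the Claim_ definition above) =====
theorem dict_type_count_spec : Claim_equal_dict_type_count := by
  intro dictionary type _ hpre
  unfold Spec_dict_type_count dict_type_count dict_type_count_alt
  rw [pv_counts_eq]
  exact pv_core _ (pv_counts_ne dictionary type hpre.1)
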